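-- pv_equiv track=rewrite | github.com/ozkayas/leetcode_solutions | 9999-A2Z-OA/Get Min Cost Data.py | getMinCostData
-- ===== SOURCE A (Python) =====
-- import heapq
--
-- def getMinCostData(data:str) -> str:
--     freq = [0 for _ in range(26)]
--     for ch in data:
--         if ch != "?":
--             idx = ord(ch) - ord("a")
--             freq[idx] += 1
--
--     minHeap = []
--     for i, f in enumerate(freq):
--         letter = chr(i + ord("a"))
--         minHeap.append((f, letter))
--
--     # minHeap = [(1,"a"),(0,"a"),(0,"b"),(1,"c"),(5,"d"),(0,"z")]
--     heapq.heapify(minHeap)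
--
--     ans = []
--     for i, ch in enumerate(data):
--         if ch == "?":
--             # get the first element with mincost and lexicog first
--             count, letter = heapq.heappop(minHeap)
--             ans.append(letter)
--             # increase counter of this letter in the heap
--             heapq.heappush(minHeap,(count +1, letter))
--
--         else:
--             ans.append(ch)
--
--
--     return ''.join(ans)
-- ===== SOURCE B (Python) =====
-- def getMinCostData(data: str) -> str:
--     freq = [0] * 26
--     for ch in data:
--         if ch != "?":
--             freq[ord(ch) - ord("a")] += 1
--
--     out = []
--     for ch in data:
--         if ch == "?":
--             # pick the least-frequent letter, smallest letter on ties
--             best = 0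
--             for i in range(1, 26):
--                 if freq[i] < freq[best]:
--                     best = i
--             out.append(chr(best + ord("a")))
--             freq[best] += 1
--         else:
--             out.append(ch)
--
--     return ''.join(out)
-- ===== Notes on version B (the rewrite author's own statement) =====
-- stated objective: simpler
-- what changed: Replaces the 26-entry heapq priority queue (heapify + pop/push per '?') with a direct argmin scan over the frequency array, ties broken toward the smallest letter by strict '<'.
import Mathlib
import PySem

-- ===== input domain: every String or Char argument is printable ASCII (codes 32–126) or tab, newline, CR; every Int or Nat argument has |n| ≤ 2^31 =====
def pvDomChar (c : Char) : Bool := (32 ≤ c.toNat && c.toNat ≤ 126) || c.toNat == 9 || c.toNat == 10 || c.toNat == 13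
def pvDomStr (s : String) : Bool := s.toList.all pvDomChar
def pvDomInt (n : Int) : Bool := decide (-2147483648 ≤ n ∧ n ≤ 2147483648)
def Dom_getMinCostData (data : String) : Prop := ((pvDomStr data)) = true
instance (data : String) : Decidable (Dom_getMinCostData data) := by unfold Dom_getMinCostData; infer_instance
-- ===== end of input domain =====

-- B replaces A's 26-entry heapq priority queue with a direct argmin scan over the frequency
-- array (simpler bookkeeping, same results).

-- ===== PORT A =====
-- heapq is not covered by PySem; it is ported by its contract: the heap is represented by the
-- list of its elements, heapq.heapify only rearranges (identity on contents), heapq.heappop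
-- removes and returns the least element under Python tuple order (pvHeapPop below; the first
-- one among equal elements), heapq.heappush adds the element. This is observationally exact
-- for A's use of the heap: A's heap always carries 26 pairwise-distinct letters, so the least
-- entry is unique whatever internal arrangement the real binary heap is in.
def pvTupLt (a b : Int × Char) : Bool := decide (a.1 < b.1) || (a.1 == b.1 && decide (a.2 < b.2))

def pvHeapPop : List (Int × Char) → Option ((Int × Char) × List (Int × Char))
  | [] => none
  | [x] => some (x, [])
  | x :: y :: t =>
    match pvHeapPop (y :: t) with
    | some (m, r) => if pvTupLt m x then some (m, x :: r) else some (x, y :: t)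
    | none => none

def pvStepA (acc : List Char × List (Int × Char)) (p : Int × Char) :
    List Char × List (Int × Char) :=
  if p.2 = '?' then
    match pvHeapPop acc.2 with
    | some ((count, letter), rest) => (acc.1 ++ [letter], rest ++ [(count + 1, letter)])
    | none => (acc.1, acc.2)          -- unreachable: the heap always holds 26 entries
  else (acc.1 ++ [p.2], acc.2)

def getMinCostData (data : String) : String :=
  let freq : List Int :=
    data.toList.foldl (fun freq ch =>
      if ch ≠ '?' then
        let idx : Int := (ch.toNat : Int) - 97
        PySem.List.pySetD freq idx (PySem.List.pyGetD freq idx 0 + 1)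
      else freq) ((List.range 26).map (fun _ => (0 : Int)))
  let minHeap : List (Int × Char) :=
    (PySem.List.enumerate freq).foldl
      (fun h p => h ++ [(p.2, Char.ofNat (p.1.toNat + 97))]) []
  -- heapq.heapify(minHeap): rearranges only, identity on contents
  let ans := ((PySem.List.enumerate data.toList).foldl pvStepA ([], minHeap)).1
  String.ofList ans

-- ===== PORT B =====
def pvArgmin (freq : List Int) : Int :=
  (PySem.List.pyRange 1 26 1).foldl
    (fun best i =>
      if PySem.List.pyGetD freq i 0 < PySem.List.pyGetD freq best 0 then i else best) 0

def pvStepB (acc : List Char × List Int) (ch : Char) : List Char × List Int :=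
  if ch = '?' then
    let best := pvArgmin acc.2
    (acc.1 ++ [Char.ofNat (best.toNat + 97)],
     PySem.List.pySetD acc.2 best (PySem.List.pyGetD acc.2 best 0 + 1))
  else (acc.1 ++ [ch], acc.2)

def getMinCostData_alt (data : String) : String :=
  let freq : List Int :=
    data.toList.foldl (fun freq ch =>
      if ch ≠ '?' then
        let idx : Int := (ch.toNat : Int) - 97
        PySem.List.pySetD freq idx (PySem.List.pyGetD freq idx 0 + 1)
      else freq) (List.replicate 26 (0 : Int))
  let out := (data.toList.foldl pvStepB ([], freq)).1
  String.ofList out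

-- ===== PRECONDITION & SPEC =====
-- Pre_ excludes exactly the inputs on which A raises IndexError: any character other than '?'
-- whose code is outside [71,122] makes ord(ch)-97 fall outside [-26,25], an invalid index into
-- the 26-element freq list (B raises identically there).
def Pre_getMinCostData (data : String) : Prop :=
  data.toList.all (fun ch => ch == '?' || (71 ≤ ch.toNat && ch.toNat ≤ 122)) = true
instance (data : String) : Decidable (Pre_getMinCostData data) := by
  unfold Pre_getMinCostData; infer_instance

def pvWitness_getMinCostData : String := "ab?a??"

def Spec_getMinCostData (data : String) (out : String) : Prop := out = getMinCostData_alt data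
instance (data : String) (out : String) : Decidable (Spec_getMinCostData data out) := by
  unfold Spec_getMinCostData; infer_instance

-- ===== CLAIM (what is proved, stated in full; the proofs are below) =====
def Claim_equal_getMinCostData : Prop := ∀ (data : String), Dom_getMinCostData data → Pre_getMinCostData data → Spec_getMinCostData data (getMinCostData data)

-- ===== LEMMAS AND PROOFS =====

-- the canonical heap contents determined by a frequency table
def pvCanon (f : List Int) : List (Int × Char) :=
  (List.range 26).map (fun (k : Nat) => (PySem.List.pyGetD f ((k : Int)) 0, Char.ofNat (k + 97)))

theorem pvTupLt_irrefl (a : Int × Char) : pvTupLt a a = false := by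
  simp [pvTupLt]

theorem pvTupLt_iff (a b : Int × Char) :
    pvTupLt a b = true ↔ a.1 < b.1 ∨ (a.1 = b.1 ∧ a.2 < b.2) := by
  simp [pvTupLt]

theorem pvTupLt_eq_false (a b : Int × Char) :
    pvTupLt a b = false ↔ b.1 < a.1 ∨ (b.1 = a.1 ∧ b.2 ≤ a.2) := by
  rw [← Bool.not_eq_true, pvTupLt_iff]
  constructor
  · intro h
    rcases lt_trichotomy a.1 b.1 with h1 | h1 | h1
    · exact absurd (Or.inl h1) h
    · refine Or.inr ⟨h1.symm, ?_⟩
      rcases le_or_gt b.2 a.2 with h2 | h2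
      · exact h2
      · exact absurd (Or.inr ⟨h1, h2⟩) h
    · exact Or.inl h1
  · rintro (h1 | ⟨h1, h2⟩) (h3 | ⟨h3, h4⟩)
    · omega
    · omega
    · omega
    · exact absurd (lt_of_lt_of_le h4 h2) (lt_irrefl _)

theorem pvTupLt_asymm {a b : Int × Char} (h : pvTupLt a b = true) : pvTupLt b a = false := by
  rw [pvTupLt_iff] at h
  rw [pvTupLt_eq_false]
  rcases h with h | ⟨h1, h2⟩
  · exact Or.inl h
  · exact Or.inr ⟨h1, le_of_lt h2⟩

theorem pvTupLt_false_trans {a b c : Int × Char} (hba : pvTupLt b a = false)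
    (hcb : pvTupLt c b = false) : pvTupLt c a = false := by
  rw [pvTupLt_eq_false] at *
  rcases hba with h1 | ⟨h1, h2⟩ <;> rcases hcb with h3 | ⟨h3, h4⟩
  · exact Or.inl (by omega)
  · exact Or.inl (by omega)
  · exact Or.inl (by omega)
  · exact Or.inr ⟨by omega, le_trans h2 h4⟩

theorem pvHeapPop_spec (l : List (Int × Char)) (h : l ≠ []) :
    ∃ m r, pvHeapPop l = some (m, r) ∧ m ∈ l ∧ r.Perm (l.erase m) ∧
      ∀ x ∈ l, pvTupLt x m = false := by
  induction l with
  | nil => exact absurd rfl h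
  | cons x tail ih =>
    cases tail with
    | nil =>
      refine ⟨x, [], rfl, List.mem_singleton.mpr rfl, by simp, ?_⟩
      intro z hz
      rw [List.mem_singleton] at hz
      subst hz
      exact pvTupLt_irrefl z
    | cons y t =>
      obtain ⟨m, r, hpop, hmem, hperm, hmin⟩ := ih (by simp)
      by_cases hlt : pvTupLt m x = true
      · refine ⟨m, x :: r, ?_, List.mem_cons_of_mem x hmem, ?_, ?_⟩
        · simp only [pvHeapPop, hpop, hlt, if_true]
        · have hne : x ≠ m := by
            rintro rfl; rw [pvTupLt_irrefl] at hlt; exact Bool.false_ne_true hlt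
          rw [List.erase_cons_tail (by simp [hne])]
          exact hperm.cons x
        · intro z hz
          rcases List.mem_cons.mp hz with rfl | hz
          · exact pvTupLt_asymm hlt
          · exact hmin z hz
      · have hlt' : pvTupLt m x = false := Bool.eq_false_iff.mpr hlt
        refine ⟨x, y :: t, ?_, List.mem_cons_self, ?_, ?_⟩
        · simp only [pvHeapPop, hpop, hlt']
          simp
        · rw [List.erase_cons_head]
        · intro z hz
          rcases List.mem_cons.mp hz with rfl | hz
          · exact pvTupLt_irrefl z
          · exact pvTupLt_false_trans hlt' (hmin z hz)

theorem pvCharToNat (a : Nat) (h : a ≤ 122) : (Char.ofNat a).toNat = a := by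
  unfold Char.ofNat
  rw [dif_pos (Or.inl (by omega))]
  simp [Char.ofNatAux, Char.toNat]
theorem pvCharLt (a b : Nat) (ha : a ≤ 122) (hb : b ≤ 122) (h : a < b) :
    Char.ofNat a < Char.ofNat b := by
  unfold Char.ofNat
  rw [dif_pos (Or.inl (by omega)), dif_pos (Or.inl (by omega))]
  simp [Char.ofNatAux, Char.lt_def, UInt32.lt_iff_toNat_lt]
  omega
theorem pvCharInj (a b : Nat) (ha : a ≤ 122) (hb : b ≤ 122)
    (h : Char.ofNat a = Char.ofNat b) : a = b := by
  have := congrArg Char.toNat h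
  rwa [pvCharToNat a ha, pvCharToNat b hb] at this

theorem pv_argmin_fold (f : List Int) (l : List Int) :
    ∀ b0 : Int, l.Pairwise (· < ·) → (∀ i ∈ l, b0 < i) →
      ((l.foldl (fun best i =>
          if PySem.List.pyGetD f i 0 < PySem.List.pyGetD f best 0 then i else best) b0 = b0 ∨
        l.foldl (fun best i =>
          if PySem.List.pyGetD f i 0 < PySem.List.pyGetD f best 0 then i else best) b0 ∈ l) ∧
      (l.foldl (fun best i =>
          if PySem.List.pyGetD f i 0 < PySem.List.pyGetD f best 0 then i else best) b0 ≠ b0 →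
        PySem.List.pyGetD f (l.foldl (fun best i =>
          if PySem.List.pyGetD f i 0 < PySem.List.pyGetD f best 0 then i else best) b0) 0 <
        PySem.List.pyGetD f b0 0) ∧
      (∀ i ∈ l, i ≠ l.foldl (fun best i =>
          if PySem.List.pyGetD f i 0 < PySem.List.pyGetD f best 0 then i else best) b0 →
        (PySem.List.pyGetD f (l.foldl (fun best i =>
            if PySem.List.pyGetD f i 0 < PySem.List.pyGetD f best 0 then i else best) b0) 0 <
          PySem.List.pyGetD f i 0 ∨
         (PySem.List.pyGetD f (l.foldl (fun best i =>
            if PySem.List.pyGetD f i 0 < PySem.List.pyGetD f best 0 then i else best) b0) 0 =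
          PySem.List.pyGetD f i 0 ∧
          l.foldl (fun best i =>
            if PySem.List.pyGetD f i 0 < PySem.List.pyGetD f best 0 then i else best) b0 < i)))) := by
  induction l with
  | nil => intro b0 _ _; exact ⟨Or.inl rfl, fun h => absurd rfl h, by simp⟩
  | cons j t ih =>
    intro b0 hpw hgt
    rw [List.pairwise_cons] at hpw
    have hb0j : b0 < j := hgt j List.mem_cons_self
    simp only [List.foldl_cons]
    set b1 := if PySem.List.pyGetD f j 0 < PySem.List.pyGetD f b0 0 then j else b0 with hb1
    have ht : ∀ i ∈ t, b1 < i := by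
      intro i hi
      rw [hb1]
      split
      · exact hpw.1 i hi
      · exact lt_trans hb0j (hpw.1 i hi)
    obtain ⟨ihm, ihlt, ihlex⟩ := ih b1 hpw.2 ht
    set b := t.foldl (fun best i =>
      if PySem.List.pyGetD f i 0 < PySem.List.pyGetD f best 0 then i else best) b1 with hbdef
    have hble : b = b1 ∨ PySem.List.pyGetD f b 0 < PySem.List.pyGetD f b1 0 := by
      by_cases hbb : b = b1
      · exact Or.inl hbb
      · exact Or.inr (ihlt hbb)
    refine ⟨?_, ?_, ?_⟩
    · rcases ihm with h | h
      · rw [hb1] at h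
        split at h
        · exact Or.inr (h ▸ List.mem_cons_self)
        · exact Or.inl h
      · exact Or.inr (List.mem_cons_of_mem j h)
    · intro hbne
      by_cases hcase : PySem.List.pyGetD f j 0 < PySem.List.pyGetD f b0 0
      · have hb1j : b1 = j := by rw [hb1, if_pos hcase]
        rcases hble with h | h
        · rw [h, hb1j]; exact hcase
        · rw [hb1j] at h; exact lt_trans h hcase
      · have hb1b0 : b1 = b0 := by rw [hb1, if_neg hcase]
        rw [hb1b0] at hble
        rcases hble with h | h
        · exact absurd h hbne
        · exact h
    · intro i hi hine
      rcases List.mem_cons.mp hi with rfl | hit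
      · -- i = j
        by_cases hcase : PySem.List.pyGetD f i 0 < PySem.List.pyGetD f b0 0
        · have hb1j : b1 = i := by rw [hb1, if_pos hcase]
          rcases hble with h | h
          · exact absurd (h.trans hb1j) hine.symm
          · exact Or.inl (hb1j ▸ h)
        · have hb1b0 : b1 = b0 := by rw [hb1, if_neg hcase]
          have hb0le : PySem.List.pyGetD f b0 0 ≤ PySem.List.pyGetD f i 0 := not_lt.mp hcase
          rcases hble with h | h
          · rw [h, hb1b0]
            rcases lt_or_eq_of_le hb0le with h2 | h2
            · exact Or.inl h2
            · exact Or.inr ⟨h2, by omega⟩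
          · exact Or.inl (lt_of_lt_of_le (hb1b0 ▸ h) hb0le)
      · exact ihlex i hit hine

theorem pvArgmin_spec (f : List Int) :
    0 ≤ pvArgmin f ∧ pvArgmin f < 26 ∧
      ∀ i : Int, 0 ≤ i → i < 26 → i ≠ pvArgmin f →
        PySem.List.pyGetD f (pvArgmin f) 0 < PySem.List.pyGetD f i 0 ∨
        (PySem.List.pyGetD f (pvArgmin f) 0 = PySem.List.pyGetD f i 0 ∧ pvArgmin f < i) := by
  obtain ⟨hm, hlt, hlex⟩ := pv_argmin_fold f (PySem.List.pyRange 1 26 1) 0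
    (PySem.List.pairwise_lt_pyRange_one 1 26)
    (fun i hi => by rw [PySem.List.mem_pyRange_one] at hi; omega)
  have hrange : pvArgmin f = 0 ∨ (1 ≤ pvArgmin f ∧ pvArgmin f < 26) := by
    unfold pvArgmin
    rcases hm with h | h
    · exact Or.inl h
    · rw [PySem.List.mem_pyRange_one] at h; exact Or.inr h
  refine ⟨by omega, by omega, ?_⟩
  intro i h0 h26 hne
  by_cases hi0 : i = 0
  · subst hi0
    have hb : pvArgmin f ≠ 0 := fun h => hne h.symm
    exact Or.inl (hlt hb)
  · exact hlex i (PySem.List.mem_pyRange_one.mpr ⟨by omega, h26⟩) hne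

theorem pvCanon_length (f : List Int) : (pvCanon f).length = 26 := by
  simp [pvCanon]

theorem pvCanon_nodup (f : List Int) : (pvCanon f).Nodup := by
  apply List.Nodup.map_on _ (List.nodup_range)
  intro x hx y hy hxy
  rw [List.mem_range] at hx hy
  have h2 := congrArg Prod.snd hxy
  simp only [] at h2
  have := pvCharInj (x + 97) (y + 97) (by omega) (by omega) h2
  omega

theorem pvCanon_set (f : List Int) (hf : f.length = 26) (n : Nat) (hn : n < 26) (v : Int) :
    pvCanon (f.set n v) = (pvCanon f).set n (v, Char.ofNat (n + 97)) := by
  apply List.ext_getElem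
  · simp [pvCanon]
  · intro k hk1 hk2
    have hk : k < 26 := by simpa [pvCanon] using hk1
    by_cases hkn : n = k
    · subst hkn
      simp [pvCanon, List.getD_eq_getElem?_getD, List.getElem?_set, hf, hn]
    · simp [pvCanon, List.getD_eq_getElem?_getD, List.getElem?_set, hkn]

theorem pvPop_canon (f : List Int) (heap : List (Int × Char)) (b : Int) (hf : f.length = 26)
    (hperm : heap.Perm (pvCanon f)) (ha0 : 0 ≤ b) (ha26 : b < 26)
    (halex : ∀ i : Int, 0 ≤ i → i < 26 → i ≠ b →
        PySem.List.pyGetD f b 0 < PySem.List.pyGetD f i 0 ∨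
        (PySem.List.pyGetD f b 0 = PySem.List.pyGetD f i 0 ∧ b < i)) :
    ∃ r, pvHeapPop heap =
        some ((PySem.List.pyGetD f b 0, Char.ofNat (b.toNat + 97)), r) ∧
      (r ++ [(PySem.List.pyGetD f b 0 + 1, Char.ofNat (b.toNat + 97))]).Perm
        (pvCanon (PySem.List.pySetD f b (PySem.List.pyGetD f b 0 + 1))) := by
  have hnb : ((b.toNat : Nat) : Int) = b := Int.toNat_of_nonneg ha0
  have hn26 : b.toNat < 26 := by omega
  have hne : heap ≠ [] := by
    intro h
    have hl := hperm.length_eq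
    rw [h, pvCanon_length f] at hl
    simp at hl
  obtain ⟨m, r, hpop, hmem, hrperm, hmin⟩ := pvHeapPop_spec heap hne
  have hcanonn : (pvCanon f)[b.toNat]'(by rw [pvCanon_length]; exact hn26) =
      (PySem.List.pyGetD f b 0, Char.ofNat (b.toNat + 97)) := by
    simp only [pvCanon, List.getElem_map, List.getElem_range]
    rw [hnb]
  have hmstmem : (PySem.List.pyGetD f b 0, Char.ofNat (b.toNat + 97)) ∈ heap := by
    rw [hperm.mem_iff, ← hcanonn]
    exact List.getElem_mem _
  -- the canonical least entry beats every other entry strictly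
  have hleast : ∀ x ∈ pvCanon f,
      x ≠ (PySem.List.pyGetD f b 0, Char.ofNat (b.toNat + 97)) →
      pvTupLt (PySem.List.pyGetD f b 0, Char.ofNat (b.toNat + 97)) x = true := by
    intro x hx hxne
    simp only [pvCanon, List.mem_map, List.mem_range] at hx
    obtain ⟨k, hk, rfl⟩ := hx
    have hkb : (k : Int) ≠ b := by
      intro h
      apply hxne
      have hkn : k = b.toNat := by omega
      rw [h, hkn]
    rcases halex k (by omega) (by omega) hkb with h | ⟨h1, h2⟩
    · exact (pvTupLt_iff _ _).mpr (Or.inl h)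
    · exact (pvTupLt_iff _ _).mpr
        (Or.inr ⟨h1, pvCharLt _ _ (by omega) (by omega) (by omega)⟩)
  have hmeq : m = (PySem.List.pyGetD f b 0, Char.ofNat (b.toNat + 97)) := by
    by_contra hne2
    have hmc : m ∈ pvCanon f := hperm.mem_iff.mp hmem
    have h2 := hleast m hmc hne2
    rw [hmin _ hmstmem] at h2
    exact Bool.false_ne_true h2
  subst hmeq
  refine ⟨r, hpop, ?_⟩
  rw [PySem.List.pySetD_of_nonneg _ _ ha0, pvCanon_set f hf b.toNat hn26]
  refine (List.perm_append_singleton _ _).trans ?_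
  refine (List.Perm.cons _ ?_).trans
    (List.set_perm_cons_eraseIdx (l := pvCanon f)
      (by rw [pvCanon_length]; exact hn26) _).symm
  refine hrperm.trans ?_
  refine (hperm.erase _).trans ?_
  rw [← hcanonn, List.Nodup.erase_getElem (pvCanon_nodup f)]

theorem pv_len_set (f : List Int) (i v : Int) :
    (PySem.List.pySetD f i v).length = f.length := PySem.List.length_pySetD f i v

theorem pv_loop (cs : List Char) : ∀ (s : Int) (ans : List Char)
    (heap : List (Int × Char)) (f : List Int), f.length = 26 → heap.Perm (pvCanon f) →
    ((PySem.List.enumerate cs s).foldl pvStepA (ans, heap)).1 =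
      (cs.foldl pvStepB (ans, f)).1 := by
  induction cs with
  | nil => intro s ans heap f _ _; simp [PySem.List.enumerate_nil]
  | cons ch rest ih =>
    intro s ans heap f hlen hperm
    rw [PySem.List.enumerate_cons, List.foldl_cons, List.foldl_cons]
    by_cases hch : ch = '?'
    · subst hch
      obtain ⟨ha0, ha26, halex⟩ := pvArgmin_spec f
      obtain ⟨r, hpop, hperm'⟩ := pvPop_canon f heap (pvArgmin f) hlen hperm ha0 ha26 halex
      have hA : pvStepA (ans, heap) (s, '?') =
          (ans ++ [Char.ofNat ((pvArgmin f).toNat + 97)],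
           r ++ [(PySem.List.pyGetD f (pvArgmin f) 0 + 1,
                  Char.ofNat ((pvArgmin f).toNat + 97))]) := by
        simp [pvStepA, hpop]
      have hB : pvStepB (ans, f) '?' =
          (ans ++ [Char.ofNat ((pvArgmin f).toNat + 97)],
           PySem.List.pySetD f (pvArgmin f) (PySem.List.pyGetD f (pvArgmin f) 0 + 1)) := by
        simp [pvStepB]
      rw [hA, hB]
      exact ih (s + 1) _ _ _ (by rw [pv_len_set]; exact hlen) hperm'
    · have hA : pvStepA (ans, heap) (s, ch) = (ans ++ [ch], heap) := by
        simp [pvStepA, hch]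
      have hB : pvStepB (ans, f) ch = (ans ++ [ch], f) := by
        simp [pvStepB, hch]
      rw [hA, hB]
      exact ih (s + 1) _ _ _ hlen hperm

theorem pv_build_len (cs : List Char) : ∀ f0 : List Int,
    (cs.foldl (fun freq ch =>
      if ch ≠ '?' then
        let idx : Int := (ch.toNat : Int) - 97
        PySem.List.pySetD freq idx (PySem.List.pyGetD freq idx 0 + 1)
      else freq) f0).length = f0.length := by
  induction cs with
  | nil => intro f0; rfl
  | cons c t ih =>
    intro f0
    rw [List.foldl_cons, ih]
    split
    · exact PySem.List.length_pySetD _ _ _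
    · rfl

theorem pv_heap_init (f : List Int) (hf : f.length = 26) :
    (PySem.List.enumerate f).foldl
      (fun h p => h ++ [(p.2, Char.ofNat (p.1.toNat + 97))]) [] = pvCanon f := by
  rw [PySem.List.foldl_append_singleton_eq_map
        (f := fun p : Int × Int => (p.2, Char.ofNat (p.1.toNat + 97))),
      PySem.List.enumerate_eq_map_pyRange f 0, PySem.List.len_eq, hf]
  rw [PySem.List.pyRange_zero_nat 26]
  simp only [List.map_map, List.nil_append, pvCanon]
  apply List.map_congr_left
  intro k hk
  simp [Function.comp]

theorem pv_main (f : List Int) (hf : f.length = 26) (cs : List Char) :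
    String.ofList (((PySem.List.enumerate cs).foldl pvStepA
        ([], (PySem.List.enumerate f).foldl
          (fun h p => h ++ [(p.2, Char.ofNat (p.1.toNat + 97))]) [])).1) =
      String.ofList ((cs.foldl pvStepB ([], f)).1) := by
  rw [pv_heap_init f hf]
  exact congrArg String.ofList (pv_loop cs 0 [] _ f hf (List.Perm.refl _))

theorem getMinCostData_spec' (data : String) :
    getMinCostData data = getMinCostData_alt data := by
  unfold getMinCostData getMinCostData_alt
  rw [show ((List.range 26).map (fun _ => (0:Int))) = List.replicate 26 (0:Int) by decide]
  exact pv_main _ (by rw [pv_build_len]; simp) data.toList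
-- ===== VERDICT (by name: the statement is the Claim_ definition above) =====
theorem getMinCostData_spec : Claim_equal_getMinCostData := by
  intro data _ _
  exact getMinCostData_spec' data
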